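-- pv_equiv track=rewrite | github.com/vaveave/advent-of-code | 2015/11/__main__.py | validation_rule_3
-- ===== SOURCE A (Python) =====
-- def validation_rule_3(psw):
--     cnt = 0
--     for i in range(len(psw)-1):
--         if psw[i] == psw[i+1]:
--             cnt += 1
--         if cnt == 2:
--             return True
--     return False
-- ===== SOURCE B (Python) =====
-- def validation_rule_3(psw):
--     # Staged searches instead of a counting scan: locate the first adjacent-equal
--     # pair, then search again strictly after it for a second (possibly overlapping) pair.
--     def first_pair_at(s, start):
--         for i in range(start, len(s) - 1):
--             if s[i] == s[i + 1]:
--                 return i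
--         return -1
--
--     first = first_pair_at(psw, 0)
--     return first != -1 and first_pair_at(psw, first + 1) != -1
-- ===== Notes on version B (the rewrite author's own statement) =====
-- stated objective: alternative
-- what changed: B replaces A's counting scan (increment to 2) by two staged searches: a helper finds the index of the first adjacent-equal pair, then is called again starting just past that index to look for a second pair.
import Mathlib
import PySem

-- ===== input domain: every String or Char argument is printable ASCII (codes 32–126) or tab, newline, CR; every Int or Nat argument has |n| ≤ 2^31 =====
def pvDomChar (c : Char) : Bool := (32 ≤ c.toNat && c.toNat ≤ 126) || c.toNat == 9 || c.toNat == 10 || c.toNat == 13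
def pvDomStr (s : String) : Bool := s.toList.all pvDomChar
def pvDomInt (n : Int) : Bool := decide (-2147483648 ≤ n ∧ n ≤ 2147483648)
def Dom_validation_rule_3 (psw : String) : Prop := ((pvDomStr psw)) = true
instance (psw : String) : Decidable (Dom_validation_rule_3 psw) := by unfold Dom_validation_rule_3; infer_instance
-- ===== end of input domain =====

-- B finds the first adjacent-equal pair and then searches again past it for a second one,
-- instead of A's counting scan; same value everywhere (alternative decomposition).

-- ===== PORT A =====
-- for i in range(len(psw)-1): compare psw[i], psw[i+1]; cnt += 1 on equality; return True when cnt == 2.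
-- psw[i] is ported as Str.pyGet?; both indices are always in range here, so Option equality agrees with Python's char equality.
def loopA (psw : String) : List Int → Int → Bool
  | [], _ => false
  | i :: rest, cnt =>
    let cnt := if PySem.Str.pyGet? psw i = PySem.Str.pyGet? psw (i + 1) then cnt + 1 else cnt
    if cnt = 2 then true else loopA psw rest cnt

def validation_rule_3 (psw : String) : Bool :=
  loopA psw (PySem.List.pyRange 0 (PySem.Str.len psw - 1) 1) 0

-- ===== PORT B =====
-- first_pair_at: scan range(start, len(s)-1) and return the first i with s[i] == s[i+1], else -1
def firstPairAt (psw : String) : List Int → Int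
  | [] => -1
  | i :: rest =>
    if PySem.Str.pyGet? psw i = PySem.Str.pyGet? psw (i + 1) then i else firstPairAt psw rest

def validation_rule_3_alt (psw : String) : Bool :=
  let first := firstPairAt psw (PySem.List.pyRange 0 (PySem.Str.len psw - 1) 1)
  (first != -1) && (firstPairAt psw (PySem.List.pyRange (first + 1) (PySem.Str.len psw - 1) 1) != -1)

-- ===== PRECONDITION & SPEC =====
def Spec_validation_rule_3 (psw : String) (out : Bool) : Prop := out = validation_rule_3_alt psw
instance (psw : String) (out : Bool) : Decidable (Spec_validation_rule_3 psw out) := by unfold Spec_validation_rule_3; infer_instance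

-- ===== CLAIM (what is proved, stated in full; the proofs are below) =====
def Claim_equal_validation_rule_3 : Prop := ∀ (psw : String), Dom_validation_rule_3 psw → Spec_validation_rule_3 psw (validation_rule_3 psw)

-- ===== LEMMAS AND PROOFS =====

-- number of equal adjacent pairs
def countAdjI : List Char → Int
  | a :: b :: t => (if a = b then 1 else 0) + countAdjI (b :: t)
  | _ => 0

lemma countAdjI_nonneg (cs : List Char) : 0 ≤ countAdjI cs := by
  induction cs with
  | nil => simp [countAdjI]
  | cons a t ih =>
    cases t with
    | nil => simp [countAdjI]
    | cons b u =>
      rw [countAdjI]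
      split_ifs <;> omega

lemma countAdjI_drop (cs : List Char) (i : Nat) (h : i + 1 < cs.length) :
    countAdjI (cs.drop i) = (if cs[i] = cs[i+1] then 1 else 0) + countAdjI (cs.drop (i+1)) := by
  have h1 : i < cs.length := by omega
  rw [List.drop_eq_getElem_cons h1, List.drop_eq_getElem_cons h]
  rfl

lemma countAdjI_short (cs : List Char) (i : Nat) (h : (cs.length : Int) - 1 ≤ (i : Int)) :
    countAdjI (cs.drop i) = 0 := by
  have : (cs.drop i).length ≤ 1 := by
    simp only [List.length_drop]; omega
  cases e : cs.drop i with
  | nil => simp [countAdjI]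
  | cons a t =>
    cases t with
    | nil => simp [countAdjI]
    | cons b u => rw [e] at this; simp at this

-- A's loop computes 'are there at least 2 - cnt more adjacent pairs from index i on'
lemma loopA_eq (psw : String) : ∀ (j : Nat) (i : Nat) (cnt : Int),
    psw.toList.length - i ≤ j → (cnt = 0 ∨ cnt = 1) →
    loopA psw (PySem.List.pyRange (i : Int) ((psw.toList.length : Int) - 1) 1) cnt
      = decide (2 ≤ cnt + countAdjI (psw.toList.drop i)) := by
  intro j
  induction j with
  | zero =>
    intro i cnt hj hc
    have hle : ((psw.toList.length : Int) - 1) ≤ (i : Int) := by omega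
    rw [PySem.List.pyRange_one_eq_nil hle, countAdjI_short psw.toList i hle]
    simp only [loopA]
    symm
    rw [decide_eq_false_iff_not]
    omega
  | succ j ih =>
    intro i cnt hj hc
    by_cases hlt : (i : Int) < (psw.toList.length : Int) - 1
    · have hi1 : i + 1 < psw.toList.length := by omega
      rw [PySem.List.pyRange_one_cons hlt]
      have g1 : PySem.Str.pyGet? psw (i : Int) = some psw.toList[i] := by
        rw [PySem.Str.pyGet?_natCast]; exact List.getElem?_eq_getElem (by omega)
      have g2 : PySem.Str.pyGet? psw ((i : Int) + 1) = some psw.toList[i+1] := by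
        have : ((i : Int) + 1) = ((i + 1 : Nat) : Int) := by push_cast; ring
        rw [this, PySem.Str.pyGet?_natCast]; exact List.getElem?_eq_getElem hi1
      have hcast : (i : Int) + 1 = ((i + 1 : Nat) : Int) := by push_cast; ring
      have hrec : PySem.List.pyRange ((i : Int) + 1) ((psw.toList.length : Int) - 1) 1
          = PySem.List.pyRange ((i + 1 : Nat) : Int) ((psw.toList.length : Int) - 1) 1 := by
        rw [hcast]
      rw [countAdjI_drop psw.toList i hi1]
      simp only [loopA, g1, g2, Option.some.injEq]
      by_cases he : psw.toList[i] = psw.toList[i+1]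
      · simp only [if_pos he]
        by_cases h2 : cnt + 1 = 2
        · simp only [if_pos h2]
          have := countAdjI_nonneg (psw.toList.drop (i+1))
          symm; simp; omega
        · simp only [if_neg h2]
          rw [hrec, ih (i+1) (cnt+1) (by omega) (by omega)]
          have harr : cnt + (1 + countAdjI (psw.toList.drop (i+1)))
              = cnt + 1 + countAdjI (psw.toList.drop (i+1)) := by ring
          rw [harr]
      · simp only [if_neg he]
        have h2 : ¬ cnt = 2 := by omega
        simp only [if_neg h2]
        rw [hrec, ih (i+1) cnt (by omega) hc]
        rw [zero_add]
    · have hle : ((psw.toList.length : Int) - 1) ≤ (i : Int) := by omega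
      rw [PySem.List.pyRange_one_eq_nil hle, countAdjI_short psw.toList i hle]
      simp only [loopA]
      symm
      rw [decide_eq_false_iff_not]
      omega

-- B's search: either no pair from i on (result -1, zero pairs remain), or it returns the
-- first pair index j ≥ i, and the pairs from i on are exactly 1 + pairs from j+1 on.
lemma firstPairAt_spec (psw : String) : ∀ (f i : Nat),
    psw.toList.length - i ≤ f →
    (firstPairAt psw (PySem.List.pyRange (i : Int) ((psw.toList.length : Int) - 1) 1) = -1
       ∧ countAdjI (psw.toList.drop i) = 0)
    ∨ (∃ j : Nat, i ≤ j ∧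
        firstPairAt psw (PySem.List.pyRange (i : Int) ((psw.toList.length : Int) - 1) 1) = (j : Int)
        ∧ countAdjI (psw.toList.drop i) = 1 + countAdjI (psw.toList.drop (j + 1))) := by
  intro f
  induction f with
  | zero =>
    intro i hf
    have hle : ((psw.toList.length : Int) - 1) ≤ (i : Int) := by omega
    rw [PySem.List.pyRange_one_eq_nil hle, countAdjI_short psw.toList i hle]
    exact Or.inl ⟨rfl, rfl⟩
  | succ f ih =>
    intro i hf
    by_cases hlt : (i : Int) < (psw.toList.length : Int) - 1
    · have hi1 : i + 1 < psw.toList.length := by omega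
      rw [PySem.List.pyRange_one_cons hlt]
      have g1 : PySem.Str.pyGet? psw (i : Int) = some psw.toList[i] := by
        rw [PySem.Str.pyGet?_natCast]; exact List.getElem?_eq_getElem (by omega)
      have g2 : PySem.Str.pyGet? psw ((i : Int) + 1) = some psw.toList[i+1] := by
        have : ((i : Int) + 1) = ((i + 1 : Nat) : Int) := by push_cast; ring
        rw [this, PySem.Str.pyGet?_natCast]; exact List.getElem?_eq_getElem hi1
      have hrec : PySem.List.pyRange ((i : Int) + 1) ((psw.toList.length : Int) - 1) 1
          = PySem.List.pyRange ((i + 1 : Nat) : Int) ((psw.toList.length : Int) - 1) 1 := by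
        have : ((i : Int) + 1) = ((i + 1 : Nat) : Int) := by push_cast; ring
        rw [this]
      simp only [firstPairAt, g1, g2, Option.some.injEq]
      by_cases he : psw.toList[i] = psw.toList[i+1]
      · rw [if_pos he]
        refine Or.inr ⟨i, le_rfl, rfl, ?_⟩
        rw [countAdjI_drop psw.toList i hi1, if_pos he]
      · rw [if_neg he, hrec]
        have hdrop : countAdjI (psw.toList.drop i) = countAdjI (psw.toList.drop (i + 1)) := by
          rw [countAdjI_drop psw.toList i hi1, if_neg he]; ring
        rcases ih (i + 1) (by omega) with ⟨h1, h2⟩ | ⟨j, hij, hj, hcnt⟩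
        · exact Or.inl ⟨h1, by rw [hdrop]; exact h2⟩
        · exact Or.inr ⟨j, by omega, hj, by rw [hdrop]; exact hcnt⟩
    · have hle : ((psw.toList.length : Int) - 1) ≤ (i : Int) := by omega
      rw [PySem.List.pyRange_one_eq_nil hle, countAdjI_short psw.toList i hle]
      exact Or.inl ⟨rfl, rfl⟩

-- ===== VERDICT (by name: the statement is the Claim_ definition above) =====
theorem validation_rule_3_spec : Claim_equal_validation_rule_3 := by
  intro psw _
  unfold Spec_validation_rule_3 validation_rule_3 validation_rule_3_alt
  have hlen : PySem.Str.len psw = (psw.toList.length : Int) := by simp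
  have hA := loopA_eq psw psw.toList.length 0 0 (by omega) (Or.inl rfl)
  simp only [Nat.cast_zero, List.drop_zero, zero_add] at hA
  rw [hlen, hA]
  rcases firstPairAt_spec psw psw.toList.length 0 (by omega) with ⟨h1, h2⟩ | ⟨j, _, hj, hcnt⟩
  · simp only [Nat.cast_zero, List.drop_zero] at h1 h2
    rw [h1, h2]
    simp
  · simp only [Nat.cast_zero, List.drop_zero] at hj hcnt
    rw [hj, hcnt]
    show decide (2 ≤ 1 + countAdjI (psw.toList.drop (j + 1)))
        = ((((j : Int)) != -1) && (firstPairAt psw (PySem.List.pyRange ((j : Int) + 1) ((psw.toList.length : Int) - 1) 1) != -1))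
    have hj1 : (j : Int) + 1 = ((j + 1 : Nat) : Int) := by push_cast; ring
    rw [hj1]
    rcases firstPairAt_spec psw psw.toList.length (j + 1) (by omega) with ⟨h1, h2⟩ | ⟨j2, _, hj2, hcnt2⟩
    · rw [h1, h2]
      simp
    · rw [hj2]
      have hpos := countAdjI_nonneg (psw.toList.drop (j2 + 1))
      have hne1 : ((j : Int) != -1) = true := by simp
      have hne2 : ((j2 : Int) != -1) = true := by simp
      rw [hne1, hne2]
      simp only [Bool.and_self, decide_eq_true_eq]
      omega
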